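-- pv_equiv track=rewrite | github.com/maxwellcavalli/macs | app/queue.py | _path_to_java_package
-- ===== SOURCE A (Python) =====
-- from typing import Dict, Any, List, Tuple, Optional
--
-- def _path_to_java_package(rel_path: str) -> Optional[str]:
--     prefixes = ("src/main/java/", "src/test/java/")
--     for prefix in prefixes:
--         if rel_path.startswith(prefix):
--             tail = rel_path[len(prefix):]
--             if "/" not in tail:
--                 return None
--             pkg = tail.rsplit("/", 1)[0].replace("/", ".")
--             return pkg
--     return None
-- ===== SOURCE B (Python) =====
-- from typing import Optional
--
-- def _path_to_java_package(rel_path: str) -> Optional[str]: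
--     parts = rel_path.split("/")
--     if parts[:3] != ["src", "main", "java"] and parts[:3] != ["src", "test", "java"]:
--         return None
--     body = parts[3:]
--     if len(body) < 2:
--         return None
--     return ".".join(body[:-1])
-- ===== Notes on version B (the rewrite author's own statement) =====
-- stated objective: simpler
-- what changed: B replaces A's prefix-loop plus rsplit/replace string surgery by one slash-split of the whole path, an index comparison of the first three components, and a dot-join of the remaining components minus the last.
import Mathlib
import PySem

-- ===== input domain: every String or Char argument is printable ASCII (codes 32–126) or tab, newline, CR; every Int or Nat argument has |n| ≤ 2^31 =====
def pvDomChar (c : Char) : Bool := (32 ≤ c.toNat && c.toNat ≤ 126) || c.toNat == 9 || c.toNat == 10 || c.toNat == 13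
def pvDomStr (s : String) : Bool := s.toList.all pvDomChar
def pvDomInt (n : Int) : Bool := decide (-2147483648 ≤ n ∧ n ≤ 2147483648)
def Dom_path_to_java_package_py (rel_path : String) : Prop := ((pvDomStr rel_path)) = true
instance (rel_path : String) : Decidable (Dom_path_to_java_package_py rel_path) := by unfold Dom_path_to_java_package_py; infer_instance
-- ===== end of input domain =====

-- B replaces A's prefix-loop plus rsplit/replace string surgery by a single slash-split and an
-- index/join formulation (objective: simpler decomposition, same cost).

-- ===== PORT A =====
-- hand port of the right-to-left scan of `s.rsplit("/", 1)`: scan the REVERSED character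
-- list for the first '/' (= the LAST '/' of s); `none` exactly when s contains no '/'.
def pvRsplitGo : List Char → Option (List Char)
  | [] => none
  | c :: t => if c = '/' then some t.reverse else pvRsplitGo t

-- hand port of `s.rsplit("/", 1)[0]` (no PySem primitive for rsplit); exact: everything
-- before the last '/', or the whole string when there is no '/'.
def pvRsplit1First (s : String) : String :=
  match pvRsplitGo s.toList.reverse with
  | some p => String.ofList p
  | none => s

-- the `for prefix in prefixes:` loop of A
def pvPkgLoop (rel_path : String) : List String → Option String
  | [] => none
  | pre :: rest =>
    if PySem.Str.startswith rel_path pre then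
      let tail := PySem.Str.slice rel_path (some (PySem.Str.len pre)) none
      if PySem.Str.isIn "/" tail = false then none
      else some (PySem.Str.replace (pvRsplit1First tail) "/" ".")
    else pvPkgLoop rel_path rest

def path_to_java_package_py (rel_path : String) : Option String :=
  pvPkgLoop rel_path ["src/main/java/", "src/test/java/"]

-- ===== PORT B =====
def path_to_java_package_py_alt (rel_path : String) : Option String :=
  match PySem.Str.split? rel_path "/" with
  | none => none  -- unreachable: the separator "/" is nonempty
  | some parts =>
    if parts.take 3 = ["src", "main", "java"] ∨ parts.take 3 = ["src", "test", "java"] then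
      let body := parts.drop 3
      if body.length < 2 then none
      else some (PySem.Str.join "." body.dropLast)
    else none

-- ===== PRECONDITION & SPEC =====
def Spec_path_to_java_package_py (rel_path : String) (out : Option String) : Prop := out = path_to_java_package_py_alt rel_path
instance (rel_path : String) (out : Option String) : Decidable (Spec_path_to_java_package_py rel_path out) := by unfold Spec_path_to_java_package_py; infer_instance

-- ===== CLAIM (what is proved, stated in full; the proofs are below) =====
def Claim_equal_path_to_java_package_py : Prop := ∀ (rel_path : String), Dom_path_to_java_package_py rel_path → Spec_path_to_java_package_py rel_path (path_to_java_package_py rel_path)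

-- ===== LEMMAS AND PROOFS =====

-- clean structural model of Python split('/') on a character list
def pvSp : List Char → List (List Char)
  | [] => [[]]
  | c :: t =>
    if c = '/' then [] :: pvSp t
    else
      match pvSp t with
      | p :: ps => (c :: p) :: ps
      | [] => [[c]]

-- clean model of replace('/', '.')
def pvRep (l : List Char) : List Char := l.map (fun c => if c = '/' then '.' else c)

-- list-level value of pvRsplit1First
def pvRsb (s : List Char) : List Char :=
  match pvRsplitGo s.reverse with
  | some p => p
  | none => s

theorem pvSp_ne_nil (t : List Char) : pvSp t ≠ [] := by
  induction t with
  | nil => simp [pvSp]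
  | cons c t ih =>
    simp only [pvSp]
    split
    · simp
    · cases h : pvSp t with
      | nil => simp
      | cons p ps => simp

def pvConsHead (x : List Char) : List (List Char) → List (List Char)
  | [] => []
  | p :: ps => (x ++ p) :: ps

theorem pvSplitOn_go_eq (fuel : Nat) (l cur : List Char) (acc : List (List Char))
    (h : l.length ≤ fuel) :
    PySem.Chars.splitOn.go ['/'] fuel l cur acc = acc.reverse ++ pvConsHead cur.reverse (pvSp l) := by
  induction fuel generalizing l cur acc with
  | zero =>
    have : l = [] := by cases l <;> simp_all
    subst this
    simp [PySem.Chars.splitOn.go, pvSp, pvConsHead]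
  | succ fuel ih =>
    cases l with
    | nil => simp [PySem.Chars.splitOn.go, pvSp, pvConsHead]
    | cons c rest =>
      simp only [PySem.Chars.splitOn.go]
      by_cases hc : c = '/'
      · subst hc
        rw [if_pos (by simp [List.isPrefixOf])]
        rw [ih _ _ _ (by simpa using Nat.le_of_succ_le_succ (by simpa using h))]
        rcases hne : pvSp rest with _ | ⟨p, ps⟩
        · exact absurd hne (pvSp_ne_nil rest)
        · simp [pvSp, pvConsHead, hne]
      · rw [if_neg (by simp [List.isPrefixOf, Ne.symm hc])]
        rw [ih _ _ _ (by simpa using Nat.le_of_succ_le_succ (by simpa using h))]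
        rcases hne : pvSp rest with _ | ⟨p, ps⟩
        · exact absurd hne (pvSp_ne_nil rest)
        · simp [pvSp, pvConsHead, hne, hc]

theorem pvSplitOn_eq (l : List Char) : PySem.Chars.splitOn l ['/'] = pvSp l := by
  have := pvSplitOn_go_eq (l.length + 1) l [] [] (by omega)
  rcases hne : pvSp l with _ | ⟨p, ps⟩
  · exact absurd hne (pvSp_ne_nil l)
  · simpa [PySem.Chars.splitOn, pvConsHead, hne] using this

theorem pvReplace_go_eq (fuel : Nat) (l acc : List Char) (h : l.length ≤ fuel) :
    PySem.Chars.replace.go ['/'] ['.'] fuel l acc = acc.reverse ++ pvRep l := by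
  induction fuel generalizing l acc with
  | zero =>
    have : l = [] := by cases l <;> simp_all
    subst this
    simp [PySem.Chars.replace.go, pvRep]
  | succ fuel ih =>
    cases l with
    | nil => simp [PySem.Chars.replace.go, pvRep]
    | cons c rest =>
      simp only [PySem.Chars.replace.go]
      by_cases hc : c = '/'
      · subst hc
        rw [if_pos (by simp [List.isPrefixOf])]
        rw [ih _ _ (by simpa using Nat.le_of_succ_le_succ (by simpa using h))]
        simp [pvRep]
      · rw [if_neg (by simp [List.isPrefixOf, Ne.symm hc])]
        rw [ih _ _ (by simpa using Nat.le_of_succ_le_succ (by simpa using h))]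
        simp [pvRep, hc]

theorem pvReplace_eq (l : List Char) : PySem.Chars.replace l ['/'] ['.'] = pvRep l := by
  have := pvReplace_go_eq l.length l [] (le_refl _)
  simpa [PySem.Chars.replace] using this

theorem pvRsplitGo_append (ys : List Char) (c : Char) :
    pvRsplitGo (ys ++ [c]) =
      match pvRsplitGo ys with
      | some p => some (c :: p)
      | none => if c = '/' then some [] else none := by
  induction ys with
  | nil => simp [pvRsplitGo]
  | cons y yt ih =>
    by_cases hy : y = '/'
    · subst hy; simp [pvRsplitGo]
    · simp [pvRsplitGo, hy, ih]

theorem pvRsplitGo_none_iff (ys : List Char) : pvRsplitGo ys = none ↔ '/' ∉ ys := by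
  induction ys with
  | nil => simp [pvRsplitGo]
  | cons y yt ih =>
    by_cases hy : y = '/'
    · subst hy; simp [pvRsplitGo]
    · simp [pvRsplitGo, hy, ih, Ne.symm hy]

theorem pvRsb_cons_of_mem (c : Char) (t : List Char) (h : '/' ∈ t) :
    pvRsb (c :: t) = c :: pvRsb t := by
  unfold pvRsb
  rw [List.reverse_cons, pvRsplitGo_append]
  rcases hg : pvRsplitGo t.reverse with _ | p
  · rw [pvRsplitGo_none_iff] at hg
    simp at hg
    exact absurd h hg
  · simp

theorem pvSp_no_slash (t : List Char) (h : '/' ∉ t) : pvSp t = [t] := by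
  induction t with
  | nil => simp [pvSp]
  | cons c t ih =>
    have hc : c ≠ '/' := by intro hc; exact h (by simp [hc])
    have ht : '/' ∉ t := by intro ht; exact h (by simp [ht])
    simp [pvSp, hc, ih ht]

theorem pvSp_len_iff (t : List Char) : 2 ≤ (pvSp t).length ↔ '/' ∈ t := by
  induction t with
  | nil => simp [pvSp]
  | cons c t ih =>
    by_cases hc : c = '/'
    · subst hc
      have h1 : pvSp t ≠ [] := pvSp_ne_nil t
      have h2 : 0 < (pvSp t).length := List.length_pos_of_ne_nil h1
      simp [pvSp]
      omega
    · rcases hne : pvSp t with _ | ⟨p, ps⟩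
      · exact absurd hne (pvSp_ne_nil t)
      · rw [hne] at ih
        simp only [pvSp, if_neg hc, hne]
        simp only [List.length_cons, List.mem_cons] at ih ⊢
        constructor
        · intro hl; exact Or.inr (ih.mp (by omega))
        · rintro (hec | hmem)
          · exact absurd hec.symm hc
          · have := ih.mpr hmem; omega

theorem pvJoin_sp (l : List Char) : PySem.Chars.join ['/'] (pvSp l) = l := by
  induction l with
  | nil => simp [pvSp, PySem.Chars.join_singleton]
  | cons c t ih =>
    by_cases hc : c = '/'
    · subst hc
      rcases hne : pvSp t with _ | ⟨p, ps⟩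
      · exact absurd hne (pvSp_ne_nil t)
      · rw [hne] at ih
        simp only [pvSp, hne, if_true]
        rw [PySem.Chars.join_cons_cons]
        simpa using ih
    · rcases hne : pvSp t with _ | ⟨p, ps⟩
      · exact absurd hne (pvSp_ne_nil t)
      · simp only [pvSp, if_neg hc, hne]
        cases ps with
        | nil =>
          simp only [PySem.Chars.join_singleton] at *
          rw [hne] at ih
          simp only [PySem.Chars.join_singleton] at ih
          simp [ih]
        | cons q qs =>
          simp only [PySem.Chars.join_cons_cons] at *
          rw [hne] at ih
          simp only [PySem.Chars.join_cons_cons] at ih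
          simp [← ih]

theorem pvJoin_cons (sep : List Char) (x : Char) (p : List Char) (l : List (List Char)) :
    PySem.Chars.join sep ((x :: p) :: l) = x :: PySem.Chars.join sep (p :: l) := by
  cases l with
  | nil => simp [PySem.Chars.join_singleton]
  | cons q qs => simp [PySem.Chars.join_cons_cons]

theorem pvRsb_no_slash_cons (t : List Char) (h : '/' ∉ t) : pvRsb ('/' :: t) = [] := by
  unfold pvRsb
  rw [List.reverse_cons, pvRsplitGo_append]
  have hg : pvRsplitGo t.reverse = none := (pvRsplitGo_none_iff _).mpr (by simpa using h)
  simp [hg]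

theorem pvMain_lemma (t : List Char) (h : '/' ∈ t) :
    pvRep (pvRsb t) = PySem.Chars.join ['.'] ((pvSp t).dropLast) := by
  induction t with
  | nil => simp at h
  | cons c t ih =>
    by_cases hm : '/' ∈ t
    · rw [pvRsb_cons_of_mem c t hm]
      have hlen : 2 ≤ (pvSp t).length := (pvSp_len_iff t).mpr hm
      rcases hne : pvSp t with _ | ⟨p, ps⟩
      · exact absurd hne (pvSp_ne_nil t)
      · have hps : ps ≠ [] := by
          intro hnil; rw [hnil] at hne; rw [hne] at hlen; simp at hlen
        rw [hne] at ih
        rw [List.dropLast_cons_of_ne_nil hps] at ih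
        by_cases hc : c = '/'
        · subst hc
          simp only [pvSp, if_true, hne]
          rw [List.dropLast_cons_of_ne_nil (by simp : (p :: ps) ≠ []),
              List.dropLast_cons_of_ne_nil hps, PySem.Chars.join_cons_cons,
              ← ih hm]
          simp [pvRep]
        · simp only [pvSp, if_neg hc, hne]
          rw [List.dropLast_cons_of_ne_nil hps, pvJoin_cons, ← ih hm]
          simp [pvRep, hc]
    · have hc : c = '/' := by
        rcases List.mem_cons.mp h with h' | h'
        · exact h'.symm
        · exact absurd h' hm
      subst hc
      rw [pvRsb_no_slash_cons t hm]
      simp only [pvSp, if_true, pvSp_no_slash t hm]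
      simp [pvRep, PySem.Chars.join_singleton]

theorem pvRsplit1First_toList (x : String) : (pvRsplit1First x).toList = pvRsb x.toList := by
  unfold pvRsplit1First pvRsb
  cases hg : pvRsplitGo x.toList.reverse with
  | none => simp
  | some p => simp

theorem pvSp_main (t : List Char) :
    pvSp ("src/main/java/".toList ++ t) =
      "src".toList :: "main".toList :: "java".toList :: pvSp t := by
  have h := pvSp_ne_nil t
  rcases hne : pvSp t with _ | ⟨p, ps⟩
  · exact absurd hne h
  · simp [pvSp, hne]

theorem pvSp_test (t : List Char) :
    pvSp ("src/test/java/".toList ++ t) =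
      "src".toList :: "test".toList :: "java".toList :: pvSp t := by
  have h := pvSp_ne_nil t
  rcases hne : pvSp t with _ | ⟨p, ps⟩
  · exact absurd hne h
  · simp [pvSp, hne]

theorem pvOfList_inj (a b : List (List Char)) (h : a.map String.ofList = b.map String.ofList) :
    a = b := by
  have hinj : Function.Injective String.ofList := by
    intro x y hxy
    have := congrArg String.toList hxy
    simpa using this
  exact (List.map_injective_iff.mpr hinj) h

theorem pv_alt_eq (s : String) :
    path_to_java_package_py_alt s =
      (if (pvSp s.toList).take 3 = ["src".toList, "main".toList, "java".toList] ∨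
          (pvSp s.toList).take 3 = ["src".toList, "test".toList, "java".toList] then
        if ((pvSp s.toList).drop 3).length < 2 then none
        else some (String.ofList (PySem.Chars.join ['.'] (((pvSp s.toList).drop 3).dropLast)))
      else none) := by
  unfold path_to_java_package_py_alt
  have hsplit : PySem.Str.split? s "/" = some ((pvSp s.toList).map String.ofList) := by
    simp [PySem.Str.split?, PySem.Chars.split?, pvSplitOn_eq]
  rw [hsplit]
  have hlit : ∀ (a b c : String),
      ((pvSp s.toList).map String.ofList).take 3 = [a, b, c] ↔
        (pvSp s.toList).take 3 = [a.toList, b.toList, c.toList] := by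
    intro a b c
    rw [← List.map_take]
    constructor
    · intro h
      apply pvOfList_inj
      rw [h]; simp
    · intro h
      rw [h]; simp
  simp only [hlit]
  split
  · rw [← List.map_drop]
    split
    · rename_i hlen
      rw [if_pos (by simpa using hlen)]
    · rename_i hlen
      rw [if_neg (by simpa using hlen)]
      congr 1
      apply String.toList_inj.mp
      simp only [PySem.Str.join, String.toList_ofList, ← List.map_dropLast, List.map_map]
      simp [Function.comp_def]
  · rfl

theorem pvStrReplace_toList (x : String) : (PySem.Str.replace x "/" ".").toList = pvRep x.toList := by
  simp only [PySem.Str.replace, String.toList_ofList]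
  rw [show "/".toList = ['/'] from rfl, show ".".toList = ['.'] from rfl, pvReplace_eq]

theorem pv_branch (s pre : String) (t : List Char) (hL : s.toList = pre.toList ++ t) :
    (if PySem.Str.isIn "/" (PySem.Str.slice s (some (PySem.Str.len pre)) none) = false then none
     else some (PySem.Str.replace
        (pvRsplit1First (PySem.Str.slice s (some (PySem.Str.len pre)) none)) "/" "."))
    = (if ((pvSp t).length < 2) then none
       else some (String.ofList (PySem.Chars.join ['.'] ((pvSp t).dropLast)))) := by
  have htail : (PySem.Str.slice s (some (PySem.Str.len pre)) none).toList = t := by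
    simp only [PySem.Str.slice, PySem.Str.len]
    rw [String.toList_ofList]
    rw [PySem.Chars.slice_eq_listSlice, PySem.List.slice_from _ (by positivity)]
    rw [hL]
    simp
  by_cases hm : '/' ∈ t
  · have hin : PySem.Str.isIn "/" (PySem.Str.slice s (some (PySem.Str.len pre)) none) = true := by
      simp only [PySem.Str.isIn]
      rw [PySem.Chars.isIn_iff_infix, htail]
      simpa [List.singleton_infix_iff] using hm
    rw [hin]
    rw [if_neg (Nat.not_lt.mpr ((pvSp_len_iff t).mpr hm))]
    simp only [Bool.true_eq_false, if_false]
    have heq : (PySem.Str.replace (pvRsplit1First (PySem.Str.slice s (some (PySem.Str.len pre)) none)) "/" ".") = String.ofList (PySem.Chars.join ['.'] ((pvSp t).dropLast)) := by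
      apply String.toList_inj.mp
      rw [pvStrReplace_toList, pvRsplit1First_toList, htail, String.toList_ofList]
      exact pvMain_lemma t hm
    rw [heq]
  · have hin : PySem.Str.isIn "/" (PySem.Str.slice s (some (PySem.Str.len pre)) none) = false := by
      simp only [PySem.Str.isIn]
      rw [PySem.Chars.isIn_eq_false_iff, htail]
      simpa [List.singleton_infix_iff] using hm
    rw [hin, if_pos rfl]
    rw [if_pos (by simp [pvSp_no_slash t hm])]

theorem pv_startswith_iff (s p : String) : PySem.Str.startswith s p = true ↔ p.toList <+: s.toList := by
  simp [PySem.Str.startswith, PySem.Chars.startswith_iff]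

theorem pv_sp_prefix_main (L r : List Char) (rest : List (List Char))
    (hsp : pvSp L = "src".toList :: "main".toList :: "java".toList :: r :: rest) :
    "src/main/java/".toList <+: L := by
  have hj := pvJoin_sp L
  rw [hsp] at hj
  refine ⟨PySem.Chars.join ['/'] (r :: rest), ?_⟩
  rw [← hj]
  simp [PySem.Chars.join_cons_cons]

theorem pv_sp_prefix_test (L r : List Char) (rest : List (List Char))
    (hsp : pvSp L = "src".toList :: "test".toList :: "java".toList :: r :: rest) :
    "src/test/java/".toList <+: L := by
  have hj := pvJoin_sp L
  rw [hsp] at hj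
  refine ⟨PySem.Chars.join ['/'] (r :: rest), ?_⟩
  rw [← hj]
  simp [PySem.Chars.join_cons_cons]

theorem pv_ports_eq (s : String) : path_to_java_package_py s = path_to_java_package_py_alt s := by
  rw [pv_alt_eq]
  simp only [path_to_java_package_py, pvPkgLoop]
  by_cases h1 : PySem.Str.startswith s "src/main/java/" = true
  · obtain ⟨t, ht⟩ := (pv_startswith_iff s _).mp h1
    rw [if_pos h1, pv_branch s "src/main/java/" t ht.symm]
    rw [show s.toList = "src/main/java/".toList ++ t from ht.symm, pvSp_main]
    rw [if_pos (Or.inl (by simp))]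
    simp
  · rw [if_neg h1]
    by_cases h2 : PySem.Str.startswith s "src/test/java/" = true
    · obtain ⟨t, ht⟩ := (pv_startswith_iff s _).mp h2
      rw [if_pos h2, pv_branch s "src/test/java/" t ht.symm]
      rw [show s.toList = "src/test/java/".toList ++ t from ht.symm, pvSp_test]
      rw [if_pos (Or.inr (by simp))]
      simp
    · rw [if_neg h2]
      by_cases hcond : (pvSp s.toList).take 3 = ["src".toList, "main".toList, "java".toList] ∨
          (pvSp s.toList).take 3 = ["src".toList, "test".toList, "java".toList]
      · rw [if_pos hcond]
        by_cases hlen : ((pvSp s.toList).drop 3).length < 2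
        · rw [if_pos hlen]
        · exfalso
          have hne : (pvSp s.toList).drop 3 ≠ [] := by
            intro hnil; rw [hnil] at hlen; simp at hlen
          obtain ⟨r, rest, hd⟩ := List.exists_cons_of_ne_nil hne
          have hsp : pvSp s.toList = (pvSp s.toList).take 3 ++ (r :: rest) := by
            rw [← hd, List.take_append_drop]
          rcases hcond with hc | hc
          · rw [hc] at hsp
            exact h1 ((pv_startswith_iff s _).mpr (pv_sp_prefix_main _ _ _ hsp))
          · rw [hc] at hsp
            exact h2 ((pv_startswith_iff s _).mpr (pv_sp_prefix_test _ _ _ hsp))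
      · rw [if_neg hcond]

-- ===== VERDICT (by name: the statement is the Claim_ definition above) =====
theorem path_to_java_package_py_spec : Claim_equal_path_to_java_package_py := by
  intro s _
  unfold Spec_path_to_java_package_py
  exact pv_ports_eq s
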